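-- pv_equiv track=rewrite | github.com/pratikadsare/Walmart-Masterfile-Filler | streamlit_app.py | _resolve_duplicate_raw_mappings
-- ===== SOURCE A (Python) =====
-- from typing import Dict, List, Tuple, Optional
--
-- def _resolve_duplicate_raw_mappings(records: List[Dict[str, str]], auto_resolve: bool) -> Tuple[List[Dict[str, str]], List[str]]:
--     bucket: Dict[str, List[Dict[str, str]]] = {}
--     for r in records:
--         bucket.setdefault(r["raw_header"], []).append(r)
--     dups = [raw for raw, lst in bucket.items() if len(lst) > 1]
--     if not dups:
--         return records, []
--     if auto_resolve:
--         resolved = []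
--         for raw, lst in bucket.items():
--             if len(lst) == 1:
--                 resolved.append(lst[0])
--             else:
--                 keep = sorted(lst, key=lambda x: x.get("tick", 0))[-1]
--                 resolved.append(keep)
--         return resolved, []
--     else:
--         return records, dups
-- ===== SOURCE B (Python) =====
-- from typing import Dict, List, Tuple
--
-- def _resolve_duplicate_raw_mappings(records: List[Dict[str, str]], auto_resolve: bool) -> Tuple[List[Dict[str, str]], List[str]]:
--     counts: Dict[str, int] = {}
--     for r in records:
--         counts[r["raw_header"]] = counts.get(r["raw_header"], 0) + 1
--     dups = [raw for raw, c in counts.items() if c > 1]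
--     if not dups:
--         return records, []
--     if not auto_resolve:
--         return records, dups
--     best: Dict[str, Dict[str, str]] = {}
--     for r in records:
--         raw = r["raw_header"]
--         if raw not in best or best[raw].get("tick", 0) <= r.get("tick", 0):
--             best[raw] = r
--     return list(best.values()), []
-- ===== Notes on version B (the rewrite author's own statement) =====
-- stated objective: simpler
-- what changed: A buckets records into per-header lists and then sorts each duplicate bucket by tick to pick its last element; B counts occurrences in one pass, returns early when there are no duplicates or auto_resolve is off, and only when resolving makes a running-max pass keeping the best-so-far record per header (>= so later ties win, matching A's stable sort), so the bucket lists and per-bucket sorts disappear.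
import Mathlib
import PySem

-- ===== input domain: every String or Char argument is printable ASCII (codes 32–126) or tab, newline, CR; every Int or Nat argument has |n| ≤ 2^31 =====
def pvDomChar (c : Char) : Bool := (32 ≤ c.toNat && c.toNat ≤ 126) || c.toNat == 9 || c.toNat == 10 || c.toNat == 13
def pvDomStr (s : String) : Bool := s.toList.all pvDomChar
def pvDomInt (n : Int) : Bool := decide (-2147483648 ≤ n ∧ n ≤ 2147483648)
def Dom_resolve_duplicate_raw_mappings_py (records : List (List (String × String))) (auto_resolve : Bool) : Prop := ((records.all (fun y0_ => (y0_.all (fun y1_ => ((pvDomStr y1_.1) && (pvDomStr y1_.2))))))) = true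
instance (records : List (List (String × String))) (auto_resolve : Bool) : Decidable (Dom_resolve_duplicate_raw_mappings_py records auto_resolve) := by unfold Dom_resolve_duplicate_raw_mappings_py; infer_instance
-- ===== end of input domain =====

-- B replaces A's bucket-lists-then-sort-each-group strategy by a counting pass with early
-- returns and, only when resolving, a running-max pass per header (ties towards the later
-- record, as A's stable sort keeps); objective: simpler. Return values only; no mutation.

-- ===== PORT A =====
-- r["raw_header"]: total form of the subscript; the KeyError inputs are excluded by Pre_ below.
def pvRaw (r : List (String × String)) : String :=
  ((r.find? (fun p => p.1 == "raw_header")).map (fun p => p.2)).getD ""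

-- r.get("tick", 0): the missing-key default 0 is ⊥ of WithBot String. Exact under Pre_, which
-- (when auto_resolve) forbids mixed tick presence inside a header group — exactly where
-- Python's str/int comparison would raise TypeError.
def pvTick (r : List (String × String)) : WithBot String :=
  (r.find? (fun p => p.1 == "tick")).map (fun p => p.2)

def resolve_duplicate_raw_mappings_py (records : List (List (String × String))) (auto_resolve : Bool) : (List (List (String × String))) × List String :=
  -- bucket.setdefault(r["raw_header"], []).append(r)  =  modify raw [] (· ++ [r])
  let bucket : PySem.Dict String (List (List (String × String))) :=
    records.foldl (fun d r => d.modify (pvRaw r) [] (fun l => l ++ [r])) PySem.Dict.empty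
  let dups : List String := (bucket.items.filter (fun p => decide (1 < p.2.length))).map (fun p => p.1)
  if dups = [] then (records, [])
  else if auto_resolve then
    -- lst[0] as headD [] (bucket lists are nonempty by construction);
    -- sorted(lst, key=…)[-1] via PySem.List.sorted and pyGetD (-1)
    let resolved : List (List (String × String)) := bucket.items.foldl (fun acc p =>
      if p.2.length = 1 then acc ++ [p.2.headD []]
      else acc ++ [PySem.List.pyGetD (PySem.List.sorted p.2 (fun x => pvTick x)) (-1) []]) []
    (resolved, [])
  else (records, dups)

-- ===== PORT B =====
def resolve_duplicate_raw_mappings_py_alt (records : List (List (String × String))) (auto_resolve : Bool) : (List (List (String × String))) × List String :=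
  let counts : PySem.Dict String Int :=
    records.foldl (fun c r => c.insert (pvRaw r) (c.getD (pvRaw r) 0 + 1)) PySem.Dict.empty
  let dups : List String := (counts.items.filter (fun p => decide (1 < p.2))).map (fun p => p.1)
  if dups = [] then (records, [])
  else if !auto_resolve then (records, dups)
  else
    let best : PySem.Dict String (List (String × String)) :=
      records.foldl (fun b r =>
        match b.get? (pvRaw r) with
        | none => b.insert (pvRaw r) r
        | some x => if pvTick x ≤ pvTick r then b.insert (pvRaw r) r else b) PySem.Dict.empty
    (best.values, [])

-- ===== PRECONDITION & SPEC =====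
-- Pre_ excludes only inputs on which A raises: (a) records lacking "raw_header" (KeyError), and
-- (b) when auto_resolve, inputs whose duplicate-header groups mix tick-carrying with tick-less
-- records, where A's per-group sort raises TypeError (B raises there too).
def Pre_resolve_duplicate_raw_mappings_py (records : List (List (String × String))) (auto_resolve : Bool) : Prop :=
  (∀ r ∈ records, (r.find? (fun p => p.1 == "raw_header")).isSome) ∧
  (auto_resolve = true → ∀ r ∈ records, ∀ s ∈ records, pvRaw r = pvRaw s →
    ((r.find? (fun p => p.1 == "tick")).isSome ↔ (s.find? (fun p => p.1 == "tick")).isSome))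
instance (records : List (List (String × String))) (auto_resolve : Bool) : Decidable (Pre_resolve_duplicate_raw_mappings_py records auto_resolve) := by unfold Pre_resolve_duplicate_raw_mappings_py; infer_instance

def pvWitness_resolve_duplicate_raw_mappings_py : (List (List (String × String))) × Bool :=
  ([[("raw_header", "a"), ("tick", "2")], [("raw_header", "a"), ("tick", "1")], [("raw_header", "b")]], true)

def Spec_resolve_duplicate_raw_mappings_py (records : List (List (String × String))) (auto_resolve : Bool) (out : (List (List (String × String))) × List String) : Prop := out = resolve_duplicate_raw_mappings_py_alt records auto_resolve
instance (records : List (List (String × String))) (auto_resolve : Bool) (out : (List (List (String × String))) × List String) : Decidable (Spec_resolve_duplicate_raw_mappings_py records auto_resolve out) := by unfold Spec_resolve_duplicate_raw_mappings_py; infer_instance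

-- ===== CLAIM (what is proved, stated in full; the proofs are below) =====
def Claim_equal_resolve_duplicate_raw_mappings_py : Prop := ∀ (records : List (List (String × String))) (auto_resolve : Bool), Dom_resolve_duplicate_raw_mappings_py records auto_resolve → Pre_resolve_duplicate_raw_mappings_py records auto_resolve → Spec_resolve_duplicate_raw_mappings_py records auto_resolve (resolve_duplicate_raw_mappings_py records auto_resolve)

-- ===== LEMMAS AND PROOFS =====

def pvRunMax (a : List (String × String)) (l : List (List (String × String))) : List (String × String) :=
  l.foldl (fun acc r => if pvTick acc ≤ pvTick r then r else acc) a

theorem pvTick_le_runMax (a : List (String × String)) (l : List (List (String × String))) :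
    ∀ y ∈ a :: l, pvTick y ≤ pvTick (pvRunMax a l) := by
  induction l generalizing a with
  | nil => intro y hy; simp at hy; subst hy; exact le_refl _
  | cons z zs ih =>
    intro y hy
    have hstep : pvRunMax a (z :: zs) = pvRunMax (if pvTick a ≤ pvTick z then z else a) zs := rfl
    rw [hstep]
    have ha' := ih (if pvTick a ≤ pvTick z then z else a) _ (List.mem_cons_self ..)
    rcases List.mem_cons.mp hy with h1 | h2
    · subst h1
      refine le_trans ?_ ha'
      split_ifs with hc
      · exact hc
      · exact le_refl _
    · rcases List.mem_cons.mp h2 with h3 | h4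
      · subst h3
        refine le_trans ?_ ha'
        split_ifs with hc
        · exact le_refl _
        · exact le_of_not_ge hc
      · exact ih _ y (List.mem_cons_of_mem _ h4)

theorem pvRunMax_mem (a : List (String × String)) (l : List (List (String × String))) :
    pvRunMax a l ∈ a :: l := by
  induction l generalizing a with
  | nil => simp [pvRunMax]
  | cons z zs ih =>
    have hstep : pvRunMax a (z :: zs) = pvRunMax (if pvTick a ≤ pvTick z then z else a) zs := rfl
    rw [hstep]
    have := ih (if pvTick a ≤ pvTick z then z else a)
    rcases List.mem_cons.mp this with h1 | h2
    · rw [h1]; split_ifs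
      · exact List.mem_cons_of_mem _ (List.mem_cons_self ..)
      · exact List.mem_cons_self ..
    · exact List.mem_cons_of_mem _ (List.mem_cons_of_mem _ h2)

theorem getLast?_insertBy_of_mem (before : List (String × String) → List (String × String) → Bool)
    (x : List (String × String)) (ys : List (List (String × String)))
    (h : ∃ y ∈ ys, before x y = true) :
    (PySem.List.insertBy before x ys).getLast? = ys.getLast? := by
  induction ys with
  | nil => simp at h
  | cons y ys ih =>
    rw [PySem.List.insertBy]
    split
    · rfl
    · next hby =>
      rcases h with ⟨y', hy', hb⟩
      rcases List.mem_cons.mp hy' with h1 | h2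
      · subst h1; simp [hb] at hby
      · have hne : PySem.List.insertBy before x ys ≠ [] := by
          intro he
          have := (PySem.List.mem_insertBy before x x ys).mpr (Or.inl rfl)
          rw [he] at this; simp at this
        cases hins : PySem.List.insertBy before x ys with
        | nil => exact absurd hins hne
        | cons a b =>
          rw [List.getLast?_cons_cons, ← hins, ih ⟨y', h2, hb⟩]
          cases hys : ys with
          | nil => subst hys; simp at h2
          | cons c d => rw [List.getLast?_cons_cons]

def pvLastMax (l : List (List (String × String))) : List (String × String) :=
  match l with
  | [] => []
  | x :: xs => pvRunMax x xs

theorem pvRunMax_append (a : List (String × String)) (l : List (List (String × String))) (x : List (String × String)) :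
    pvRunMax a (l ++ [x]) = if pvTick (pvRunMax a l) ≤ pvTick x then x else pvRunMax a l := by
  simp [pvRunMax, List.foldl_append]

theorem pvLastMax_append (l : List (List (String × String))) (x : List (String × String)) (h : l ≠ []) :
    pvLastMax (l ++ [x]) = if pvTick (pvLastMax l) ≤ pvTick x then x else pvLastMax l := by
  cases l with
  | nil => simp at h
  | cons y ys => simp [pvLastMax, pvRunMax_append]

theorem sorted_getLast? (l : List (List (String × String))) (h : l ≠ []) :
    (PySem.List.sorted l (fun x => pvTick x)).getLast? = some (pvLastMax l) := by
  induction l using List.reverseRecOn with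
  | nil => simp at h
  | append_singleton m x ih =>
    rw [PySem.List.sorted_eq_foldl_insertBy, List.foldl_append]
    rw [← PySem.List.sorted_eq_foldl_insertBy]
    cases hm : m with
    | nil =>
      subst hm
      simp [PySem.List.sorted, PySem.List.insertBy, pvLastMax, pvRunMax]
    | cons c d =>
      have hmne : m ≠ [] := by simp [hm]
      rw [← hm]
      by_cases hc : pvTick (pvLastMax m) ≤ pvTick x
      · have hall : ∀ y ∈ PySem.List.sorted m (fun x => pvTick x), (fun a b => decide (pvTick a < pvTick b)) x y = false := by
          intro y hy
          have hym : y ∈ m := (PySem.List.mem_sorted ..).mp hy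
          have : pvTick y ≤ pvTick (pvLastMax m) := by
            cases hm2 : m with
            | nil => exact absurd hm2 hmne
            | cons c' d' =>
              have := pvTick_le_runMax c' d' y (hm2 ▸ hym)
              simpa [pvLastMax, hm2] using this
          simp only [decide_eq_false_iff_not, not_lt]
          exact le_trans this hc
        rw [List.foldl, List.foldl, PySem.List.insertBy_of_forall_not_before _ _ _ hall]
        rw [List.getLast?_append]
        simp [pvLastMax_append m x hmne, hc]
      · have hmem : pvLastMax m ∈ PySem.List.sorted m (fun x => pvTick x) := by
          apply (PySem.List.mem_sorted ..).mpr
          cases hm2 : m with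
          | nil => exact absurd hm2 hmne
          | cons c' d' => simpa [pvLastMax, hm2] using pvRunMax_mem c' d'
        rw [List.foldl, List.foldl]
        rw [getLast?_insertBy_of_mem _ _ _ ⟨pvLastMax m, hmem, by simp [not_le.mp hc]⟩]
        rw [ih hmne]
        simp [pvLastMax_append m x hmne, hc]

theorem keep_eq_lastMax (l : List (List (String × String))) (h : l ≠ []) :
    (if l.length = 1 then l.headD []
     else PySem.List.pyGetD (PySem.List.sorted l (fun x => pvTick x)) (-1) []) = pvLastMax l := by
  split
  · next h1 =>
    rcases List.length_eq_one_iff.mp h1 with ⟨x, rfl⟩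
    simp [pvLastMax, pvRunMax]
  · next h1 =>
    have hs : PySem.List.sorted l (fun x => pvTick x) ≠ [] := by
      simp [PySem.List.sorted_eq_nil_iff, h]
    rw [PySem.List.pyGetD_neg_one _ _ hs]
    have := sorted_getLast? l h
    rw [List.getLast?_eq_some_getLast hs] at this
    exact Option.some_injective _ this

theorem get?_of_items_map {ν ν' : Type} (g : ν → ν') (d : PySem.Dict String ν) (c : PySem.Dict String ν')
    (h : c.items = d.items.map (fun p => (p.1, g p.2))) (k : String) :
    c.get? k = (d.get? k).map g := by
  simp [PySem.Dict.get?, h, List.find?_map, Option.map_map, Function.comp_def]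

theorem contains_of_items_map {ν ν' : Type} (g : ν → ν') (d : PySem.Dict String ν) (c : PySem.Dict String ν')
    (h : c.items = d.items.map (fun p => (p.1, g p.2))) (k : String) :
    c.contains k = d.contains k := by
  simp [PySem.Dict.contains, h, List.any_map, Function.comp_def]

def pvInv (d : PySem.Dict String (List (List (String × String))))
    (c : PySem.Dict String Int) (b : PySem.Dict String (List (String × String))) : Prop :=
  d.keys.Nodup ∧ (∀ p ∈ d.items, p.2 ≠ []) ∧
  c.items = d.items.map (fun p => (p.1, (p.2.length : Int))) ∧
  b.items = d.items.map (fun p => (p.1, pvLastMax p.2))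

theorem pvInv_step (d : PySem.Dict String (List (List (String × String))))
    (c : PySem.Dict String Int) (b : PySem.Dict String (List (String × String)))
    (r : List (String × String)) (h : pvInv d c b) :
    pvInv (d.modify (pvRaw r) [] (fun l => l ++ [r]))
      (c.insert (pvRaw r) (c.getD (pvRaw r) 0 + 1))
      (match b.get? (pvRaw r) with
       | none => b.insert (pvRaw r) r
       | some x => if pvTick x ≤ pvTick r then b.insert (pvRaw r) r else b) := by
  obtain ⟨hnd, hne, hc, hb⟩ := h
  set raw := pvRaw r with hraw
  have hcontc : c.contains raw = d.contains raw := contains_of_items_map (fun l => ((l.length : Int))) d c hc raw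
  have hcontb : b.contains raw = d.contains raw := contains_of_items_map pvLastMax d b hb raw
  have hgetc : c.get? raw = (d.get? raw).map (fun l => (l.length : Int)) := get?_of_items_map (fun l => ((l.length : Int))) d c hc raw
  have hgetb : b.get? raw = (d.get? raw).map pvLastMax := get?_of_items_map pvLastMax d b hb raw
  rw [PySem.Dict.modify]
  by_cases hct : d.contains raw = true
  · -- existing key
    obtain ⟨lst, hget⟩ : ∃ lst, d.get? raw = some lst := by
      have := PySem.Dict.contains_eq_isSome_get? d raw
      rw [hct] at this
      exact Option.isSome_iff_exists.mp this.symm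
    have hgd : d.getD raw [] = lst := PySem.Dict.getD_of_get?_eq_some d [] hget
    have hlst : lst ≠ [] := hne (raw, lst) (PySem.Dict.mem_items_of_get?_eq_some d hget)
    have hkey : ∀ p ∈ d.items, p.1 = raw → p.2 = lst := by
      intro p hp hpk
      have h1 : (p.1, p.2) ∈ d.items := by simpa using hp
      have h2 := PySem.Dict.get?_of_mem_items _ h1 hnd
      rw [hpk, hget] at h2
      exact (Option.some_injective _ h2).symm
    have hdit : (d.insert raw (d.getD raw [] ++ [r])).items
        = d.items.map (fun p => if p.1 == raw then (raw, lst ++ [r]) else p) := by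
      rw [hgd]; exact PySem.Dict.items_insert_of_contains d _ hct
    refine ⟨PySem.Dict.nodup_keys_insert _ _ _ hnd, ?_, ?_, ?_⟩
    · intro p hp
      rw [hdit] at hp
      rcases List.mem_map.mp hp with ⟨q, hq, hqe⟩
      by_cases hqk : q.1 = raw
      · rw [← hqe]; simp [hqk]
      · rw [← hqe]; simp [hqk]; exact hne q hq
    · -- counts
      have hcct : c.contains raw = true := by rw [hcontc]; exact hct
      have hcgd : c.getD raw 0 = (lst.length : Int) := by
        rw [PySem.Dict.getD_eq_get?_getD, hgetc, hget]; rfl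
      rw [PySem.Dict.items_insert_of_contains c _ hcct, hdit, hc]
      rw [List.map_map, List.map_map]
      refine List.map_congr_left ?_
      intro p hp
      by_cases hpk : p.1 = raw
      · have := hkey p hp hpk
        simp [Function.comp, hpk, hcgd]
      · simp [Function.comp, hpk]
    · -- best
      rw [hgetb, hget]
      simp only [Option.map_some]
      by_cases hcmp : pvTick (pvLastMax lst) ≤ pvTick r
      · rw [if_pos hcmp]
        have hbct : b.contains raw = true := by rw [hcontb]; exact hct
        rw [PySem.Dict.items_insert_of_contains b _ hbct, hdit, hb]
        rw [List.map_map, List.map_map]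
        refine List.map_congr_left ?_
        intro p hp
        by_cases hpk : p.1 = raw
        · simp [Function.comp, hpk, pvLastMax_append lst r hlst, hcmp]
        · simp [Function.comp, hpk]
      · rw [if_neg hcmp]
        rw [hdit, hb, List.map_map]
        refine List.map_congr_left ?_
        intro p hp
        by_cases hpk : p.1 = raw
        · have := hkey p hp hpk
          simp [Function.comp, hpk, this, pvLastMax_append lst r hlst, hcmp]
        · simp [Function.comp, hpk]
  · -- new key
    have hct' : d.contains raw = false := by simpa using hct
    have hgd : d.getD raw [] = [] := PySem.Dict.getD_of_not_contains d [] hct'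
    have hdit : (d.insert raw (d.getD raw [] ++ [r])).items = d.items ++ [(raw, [r])] := by
      rw [hgd]; simpa using PySem.Dict.items_insert_of_not_contains d _ hct'
    refine ⟨PySem.Dict.nodup_keys_insert _ _ _ hnd, ?_, ?_, ?_⟩
    · intro p hp
      rw [hdit] at hp
      rcases List.mem_append.mp hp with h1 | h2
      · exact hne p h1
      · simp at h2; rw [h2]; simp
    · have hcct : c.contains raw = false := by rw [hcontc]; exact hct'
      have hcgd : c.getD raw 0 = 0 := PySem.Dict.getD_of_not_contains c 0 hcct
      rw [PySem.Dict.items_insert_of_not_contains c _ hcct, hdit, hc, List.map_append]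
      simp [hcgd]
    · have hbct : b.contains raw = false := by rw [hcontb]; exact hct'
      have hbg : b.get? raw = none := (PySem.Dict.get?_eq_none_iff_contains b raw).mpr hbct
      rw [hbg]
      simp only []
      rw [PySem.Dict.items_insert_of_not_contains b _ hbct, hdit, hb, List.map_append]
      simp [pvLastMax, pvRunMax]

-- The bucket fold (A), the counting fold (B's first pass) and the best fold (B's second pass)
-- run over the same records; the invariant relates the three resulting dicts.
theorem pvInv_fold (rs : List (List (String × String)))
    (d : PySem.Dict String (List (List (String × String))))
    (c : PySem.Dict String Int) (b : PySem.Dict String (List (String × String)))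
    (h : pvInv d c b) :
    pvInv (rs.foldl (fun d r => d.modify (pvRaw r) [] (fun l => l ++ [r])) d)
      (rs.foldl (fun c r => c.insert (pvRaw r) (c.getD (pvRaw r) 0 + 1)) c)
      (rs.foldl (fun b r =>
        match b.get? (pvRaw r) with
        | none => b.insert (pvRaw r) r
        | some x => if pvTick x ≤ pvTick r then b.insert (pvRaw r) r else b) b) := by
  induction rs generalizing d c b with
  | nil => exact h
  | cons r rs ih => exact ih _ _ _ (pvInv_step d c b r h)

theorem pv_filter_counts (l : List (String × List (List (String × String)))) :
    (((l.map (fun p => (p.1, (p.2.length : Int)))).filter (fun p => decide (1 < p.2))).map (fun p => p.1))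
      = ((l.filter (fun p => decide (1 < p.2.length))).map (fun p => p.1)) := by
  induction l with
  | nil => rfl
  | cons p t ih =>
    simp only [List.map_cons, List.filter_cons]
    by_cases h1 : 1 < p.2.length
    · have hi : (1 : Int) < (p.2.length : Int) := by exact_mod_cast h1
      simp [h1, hi, ih]
    · have hi : ¬ (1 : Int) < (p.2.length : Int) := by exact_mod_cast h1
      simp [h1, hi, ih]

-- ===== VERDICT (by name: the statement is the Claim_ definition above) =====
theorem resolve_duplicate_raw_mappings_py_spec : Claim_equal_resolve_duplicate_raw_mappings_py := by
  intro records auto_resolve _hdom _hpre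
  unfold Spec_resolve_duplicate_raw_mappings_py
  have hempty : pvInv PySem.Dict.empty PySem.Dict.empty PySem.Dict.empty := by
    refine ⟨?_, ?_, ?_, ?_⟩ <;> simp [PySem.Dict.empty, PySem.Dict.keys]
  obtain ⟨hnd, hne, hc, hb⟩ :=
    pvInv_fold records PySem.Dict.empty PySem.Dict.empty PySem.Dict.empty hempty
  simp only [resolve_duplicate_raw_mappings_py, resolve_duplicate_raw_mappings_py_alt,
    PySem.Dict.values]
  rw [hc, hb, pv_filter_counts]
  have hres : (records.foldl (fun d r => d.modify (pvRaw r) [] (fun l => l ++ [r]))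
      PySem.Dict.empty).items.foldl (fun acc p =>
        if p.2.length = 1 then acc ++ [p.2.headD []]
        else acc ++ [PySem.List.pyGetD (PySem.List.sorted p.2 (fun x => pvTick x)) (-1) []]) []
      = (records.foldl (fun d r => d.modify (pvRaw r) [] (fun l => l ++ [r]))
      PySem.Dict.empty).items.map (fun p => pvLastMax p.2) := by
    have hfun : (fun (acc : List (List (String × String))) (p : String × List (List (String × String))) =>
        if p.2.length = 1 then acc ++ [p.2.headD []]
        else acc ++ [PySem.List.pyGetD (PySem.List.sorted p.2 (fun x => pvTick x)) (-1) []])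
        = fun acc p => acc ++ [if p.2.length = 1 then p.2.headD []
            else PySem.List.pyGetD (PySem.List.sorted p.2 (fun x => pvTick x)) (-1) []] := by
      funext acc p; split <;> rfl
    rw [hfun, PySem.List.foldl_append_singleton_eq_map]
    simp only [List.nil_append]
    exact List.map_congr_left (fun p hp => keep_eq_lastMax p.2 (hne p hp))
  rw [hres, List.map_map]
  cases auto_resolve <;> simp [Function.comp_def]
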